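-- pv_equiv track=rewrite | github.com/hoover82/arrays_lists_dictionaries_sets | list_counts.py | counts_of_items_sorted
-- ===== SOURCE A (Python) =====
-- def counts_of_items_sorted ( inbound ):
-- #Accepts an array or list, returns a dictionary conprehension of how many times each element appears in the list
-- #Dictionary returns values sorted. -- This is the same code as above, but with sorting of resutlant dictionary added
-- # Dan Stober: 2018/02/12
--
--     counting_dict = {}
--
--     for item in inbound:
--         if item not in counting_dict:
--             counting_dict [item]  = 1
--
--         else:
--             counting_dict [item]  += 1
--
--     #Dictionary of counts is complete, now sort by creating a set of the dictionary keys
--     sorted_keys = set()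
--     sorted_dict = {}
--
--     for item in counting_dict:
--         sorted_keys.add ( item )
--
--     sorted_keys = sorted(sorted_keys)
--
--     for item in sorted_keys:
--         sorted_dict [item] = counting_dict [item]
--
-- 		#    return ( counting_dict )
--     return ( sorted_dict )
-- ===== SOURCE B (Python) =====
-- def counts_of_items_sorted(inbound):
--     # Sort first, then count in one pass: dicts keep insertion order,
--     # so counting over the sorted input yields a key-sorted dict directly.
--     d = {}
--     for item in sorted(inbound):
--         d[item] = d.get(item, 0) + 1
--     return d
-- ===== Notes on version B (the rewrite author's own statement) =====
-- stated objective: simpler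
-- what changed: Sorts the input once and counts in a single pass into an insertion-ordered dict, replacing A's three phases (count into a dict, copy keys into a set, sort the keys and rebuild a second dict).
import Mathlib
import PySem

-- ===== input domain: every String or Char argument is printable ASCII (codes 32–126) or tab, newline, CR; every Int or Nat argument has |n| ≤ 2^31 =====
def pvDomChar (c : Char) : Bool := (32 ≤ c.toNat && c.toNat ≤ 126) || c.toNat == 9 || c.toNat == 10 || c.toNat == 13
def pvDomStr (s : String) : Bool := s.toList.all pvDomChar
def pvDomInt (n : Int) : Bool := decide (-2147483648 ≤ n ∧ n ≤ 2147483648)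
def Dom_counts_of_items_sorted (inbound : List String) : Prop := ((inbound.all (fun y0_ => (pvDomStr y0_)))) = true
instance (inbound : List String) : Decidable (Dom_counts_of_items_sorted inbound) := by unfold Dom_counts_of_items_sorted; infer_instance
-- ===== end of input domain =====

-- B sorts the input once and counts in a single pass into an insertion-ordered dict,
-- replacing A's three phases (count, collect keys into a set, sort keys and rebuild).

-- ===== PORT A =====
def counts_of_items_sorted (inbound : List String) : List (String × Int) :=
  let counting_dict : PySem.Dict String Int :=
    inbound.foldl (fun d item =>
      if d.contains item = false then d.insert item 1
      else d.insert item (d.getD item 0 + 1)) PySem.Dict.empty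
  let sorted_keys0 : PySem.Set String :=
    counting_dict.keys.foldl (fun s item => PySem.Set.add s item) PySem.Set.empty
  let sorted_keys := PySem.List.sorted sorted_keys0 (fun x => x)
  let sorted_dict : PySem.Dict String Int :=
    sorted_keys.foldl (fun d item => d.insert item (counting_dict.getD item 0)) PySem.Dict.empty
  sorted_dict.items

-- ===== PORT B =====
def counts_of_items_sorted_alt (inbound : List String) : List (String × Int) :=
  ((PySem.List.sorted inbound (fun x => x)).foldl
    (fun d item => d.insert item (d.getD item 0 + 1))
    (PySem.Dict.empty : PySem.Dict String Int)).items

-- ===== PRECONDITION & SPEC =====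
def Spec_counts_of_items_sorted (inbound : List String) (out : List (String × Int)) : Prop := out = counts_of_items_sorted_alt inbound
instance (inbound : List String) (out : List (String × Int)) : Decidable (Spec_counts_of_items_sorted inbound out) := by unfold Spec_counts_of_items_sorted; infer_instance

-- ===== CLAIM (what is proved, stated in full; the proofs are below) =====
def Claim_equal_counts_of_items_sorted : Prop := ∀ (inbound : List String), Dom_counts_of_items_sorted inbound → Spec_counts_of_items_sorted inbound (counts_of_items_sorted inbound)

-- ===== LEMMAS AND PROOFS =====

-- A's counting branch is exactly the unconditional `d[item] = d.get(item, 0) + 1` step.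
lemma pvStepA_eq (d : PySem.Dict String Int) (item : String) :
    (if d.contains item = false then d.insert item 1 else d.insert item (d.getD item 0 + 1))
      = d.insert item (d.getD item 0 + 1) := by
  by_cases h : d.contains item = false
  · simp [h, PySem.Dict.getD_of_not_contains]
  · simp [h]

-- set(xs) keeps first occurrences in order, hence is a sublist of xs.
lemma pvOfList_sublist {α : Type} [BEq α] [LawfulBEq α] (xs : List α) : (PySem.Set.ofList xs).Sublist xs := by
  induction xs with
  | nil => simp [PySem.Set.ofList_nil]
  | cons x xs ih =>
    rw [PySem.Set.ofList_cons]
    exact List.Sublist.cons₂ x (List.Sublist.trans (List.filter_sublist) ih)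

-- sorting the distinct elements = taking the distinct elements of the sorted list
lemma pvSorted_ofList (inbound : List String) :
    PySem.List.sorted (PySem.Set.ofList inbound) (fun x => x)
      = PySem.Set.ofList (PySem.List.sorted inbound (fun x => x)) := by
  apply PySem.List.sorted_eq_of_perm_of_pairwise_lt
  · apply (List.perm_ext_iff_of_nodup (PySem.Set.nodup_ofList _) (PySem.Set.nodup_ofList _)).mpr
    intro a
    simp only [PySem.Set.mem_ofList, PySem.List.mem_sorted]
  · have hle : List.Pairwise (fun a b : String => a ≤ b)
        (PySem.Set.ofList (PySem.List.sorted inbound (fun x => x))) :=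
      List.Pairwise.sublist (pvOfList_sublist _) (PySem.List.sorted_pairwise inbound (fun x => x))
    have hne : List.Pairwise (fun a b : String => a ≠ b)
        (PySem.Set.ofList (PySem.List.sorted inbound (fun x => x))) :=
      PySem.Set.nodup_ofList _
    exact (hle.and hne).imp (fun h => lt_of_le_of_ne h.1 h.2)

lemma pvA_eq (inbound : List String) :
    counts_of_items_sorted inbound
      = (PySem.List.sorted (PySem.Set.ofList inbound) (fun x => x)).map
          (fun k => (k, (inbound.count k : Int))) := by
  unfold counts_of_items_sorted
  have hcount : inbound.foldl (fun d item =>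
      if d.contains item = false then d.insert item 1
      else d.insert item (d.getD item 0 + 1)) PySem.Dict.empty = PySem.Dict.counter inbound := by
    rw [show (fun (d : PySem.Dict String Int) item =>
        if d.contains item = false then d.insert item 1
        else d.insert item (d.getD item 0 + 1))
      = (fun d item => d.insert item (d.getD item 0 + 1)) from funext fun d => funext fun i => pvStepA_eq d i]
    exact PySem.Dict.foldl_insert_getD_add_one_eq_counter inbound
  simp only [hcount]
  have hkeys : (PySem.Dict.counter inbound).keys.foldl
      (fun s item => PySem.Set.add s item) PySem.Set.empty = PySem.Set.ofList inbound := by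
    rw [PySem.Dict.keys_counter]
    exact PySem.Set.ofList_ofList inbound
  simp only [hkeys]
  have hnd : (PySem.List.sorted (PySem.Set.ofList inbound) (fun x => x)).Nodup :=
    (PySem.List.sorted_perm _ _ false).nodup_iff.mpr (PySem.Set.nodup_ofList _)
  have := PySem.Dict.items_foldl_insert_fresh
    (PySem.List.sorted (PySem.Set.ofList inbound) (fun x => x))
    (fun a => a) (fun a => (PySem.Dict.counter inbound).getD a 0) PySem.Dict.empty
    (by intro a _; exact PySem.Dict.contains_empty a)
    (by simpa using hnd)
  rw [this, show (PySem.Dict.empty : PySem.Dict String Int).items = [] from rfl, List.nil_append]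
  exact List.map_congr_left (fun k _ => by simp [PySem.Dict.getD_counter])

lemma pvB_eq (inbound : List String) :
    counts_of_items_sorted_alt inbound
      = (PySem.List.sorted (PySem.Set.ofList inbound) (fun x => x)).map
          (fun k => (k, (inbound.count k : Int))) := by
  unfold counts_of_items_sorted_alt
  rw [PySem.Dict.foldl_insert_getD_add_one_eq_counter, PySem.Dict.items_counter, pvSorted_ofList]
  exact List.map_congr_left (fun k _ => by
    rw [(PySem.List.sorted_perm inbound (fun x => x) false).count_eq])

-- ===== VERDICT (by name: the statement is the Claim_ definition above) =====
theorem counts_of_items_sorted_spec : Claim_equal_counts_of_items_sorted := by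
  intro inbound _
  unfold Spec_counts_of_items_sorted
  rw [pvA_eq, pvB_eq]
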